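-- pv_equiv track=rewrite | github.com/LTTXZC/ASDN-for-block-cipher | ASDND/GIFT/gift1.py | rowperm
-- ===== SOURCE A (Python) =====
-- def rowperm(S, B0_pos, B1_pos, B2_pos, B3_pos):
--     T = 0x0000;
--     for b in range(0, 4):
--         T |= ((S >> (4 * b + 0)) & 0x1) << (b + 4 * B0_pos);
--         T |= ((S >> (4 * b + 1)) & 0x1) << (b + 4 * B1_pos);
--         T |= ((S >> (4 * b + 2)) & 0x1) << (b + 4 * B2_pos);
--         T |= ((S >> (4 * b + 3)) & 0x1) << (b + 4 * B3_pos);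
--
--
--     return (T)
-- ===== SOURCE B (Python) =====
-- def rowperm(S, B0_pos, B1_pos, B2_pos, B3_pos):
--     # SWAR nibble-gather: for each column j, extract the four bits j,4+j,8+j,12+j
--     # with a strided mask, compress them into one nibble by shift-folding, and
--     # place the whole nibble with a single shift to 4*pos. 4 nibble moves, no
--     # per-bit loop.
--     T = 0
--     for j, p in enumerate((B0_pos, B1_pos, B2_pos, B3_pos)):
--         x = (S >> j) & 0x1111
--         nib = (x | (x >> 3) | (x >> 6) | (x >> 9)) & 0xF
--         T |= nib << (4 * p)
--     return T
-- ===== Notes on version B (the rewrite author's own statement) =====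
-- stated objective: alternative
-- what changed: B replaces A's 16 single-bit moves (4x4 fused loop) by a SWAR scheme: per column it extracts the four strided bits with one mask (S>>j)&0x1111, compresses them into a nibble by shift-folding (x|x>>3|x>>6|x>>9)&0xF, and places the whole nibble with a single shift, so it does 4 nibble moves instead of 16 bit moves.
import Mathlib
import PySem

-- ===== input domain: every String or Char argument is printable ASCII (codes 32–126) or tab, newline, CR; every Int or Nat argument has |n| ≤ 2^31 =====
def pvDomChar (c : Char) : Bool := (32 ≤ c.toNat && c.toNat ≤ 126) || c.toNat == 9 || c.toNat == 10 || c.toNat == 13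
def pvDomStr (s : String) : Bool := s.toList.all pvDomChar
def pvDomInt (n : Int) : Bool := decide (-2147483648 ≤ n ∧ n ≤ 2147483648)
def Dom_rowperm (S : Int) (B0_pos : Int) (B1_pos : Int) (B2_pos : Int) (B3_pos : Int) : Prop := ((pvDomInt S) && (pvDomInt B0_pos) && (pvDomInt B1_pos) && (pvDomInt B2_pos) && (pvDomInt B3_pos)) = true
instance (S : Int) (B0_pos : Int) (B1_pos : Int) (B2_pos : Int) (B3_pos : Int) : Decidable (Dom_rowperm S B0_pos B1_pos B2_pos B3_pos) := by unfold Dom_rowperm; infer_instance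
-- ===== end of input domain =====

-- B replaces A's 16 single-bit moves by a per-column SWAR mask + shift-fold nibble
-- compression followed by one whole-nibble shift (objective: alternative algorithm);
-- same return value on Pre_.

-- ===== PORT A =====
-- shift amounts are Int expressions; '.toNat' is exact here: 4*b+j is always >= 0 on the
-- loop range, and b + 4*Bi_pos >= 0 exactly on Pre_ (Python raises on a negative shift).
def rowperm (S : Int) (B0_pos : Int) (B1_pos : Int) (B2_pos : Int) (B3_pos : Int) : Int :=
  (PySem.List.pyRange 0 4 1).foldl (fun T b =>
    let k0 : Nat := (4 * b + 0).toNat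
    let k1 : Nat := (4 * b + 1).toNat
    let k2 : Nat := (4 * b + 2).toNat
    let k3 : Nat := (4 * b + 3).toNat
    let T := PySem.Int.bor T ((PySem.Int.band (S >>> k0) 0x1) <<< (b + 4 * B0_pos).toNat)
    let T := PySem.Int.bor T ((PySem.Int.band (S >>> k1) 0x1) <<< (b + 4 * B1_pos).toNat)
    let T := PySem.Int.bor T ((PySem.Int.band (S >>> k2) 0x1) <<< (b + 4 * B2_pos).toNat)
    PySem.Int.bor T ((PySem.Int.band (S >>> k3) 0x1) <<< (b + 4 * B3_pos).toNat)) 0x0000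

-- ===== PORT B =====
-- enumerate indices are 0..3, so '.toNat' on the index is exact; '(4*p).toNat' is exact
-- on Pre_ (p >= 0; Python raises on a negative shift count).
def rowperm_alt (S : Int) (B0_pos : Int) (B1_pos : Int) (B2_pos : Int) (B3_pos : Int) : Int :=
  (PySem.List.enumerate [B0_pos, B1_pos, B2_pos, B3_pos]).foldl (fun T jp =>
    let j : Nat := (jp.1).toNat
    let q : Nat := (4 * jp.2).toNat
    let x := PySem.Int.band (S >>> j) 0x1111
    let nib := PySem.Int.band (PySem.Int.bor (PySem.Int.bor (PySem.Int.bor x (x >>> (3:Nat))) (x >>> (6:Nat))) (x >>> (9:Nat))) 0xF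
    PySem.Int.bor T (nib <<< q)) 0

-- ===== PRECONDITION & SPEC =====
-- Pre_ excludes negative row positions: there Python's '<<' gets a negative shift count and
-- A raises ValueError (B raises too).
def Pre_rowperm (S : Int) (B0_pos : Int) (B1_pos : Int) (B2_pos : Int) (B3_pos : Int) : Prop :=
  0 ≤ B0_pos ∧ 0 ≤ B1_pos ∧ 0 ≤ B2_pos ∧ 0 ≤ B3_pos
instance (S : Int) (B0_pos : Int) (B1_pos : Int) (B2_pos : Int) (B3_pos : Int) : Decidable (Pre_rowperm S B0_pos B1_pos B2_pos B3_pos) := by unfold Pre_rowperm; infer_instance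
def pvWitness_rowperm : Int × Int × Int × Int × Int := (51966, 0, 1, 2, 3)

def Spec_rowperm (S : Int) (B0_pos : Int) (B1_pos : Int) (B2_pos : Int) (B3_pos : Int) (out : Int) : Prop := out = rowperm_alt S B0_pos B1_pos B2_pos B3_pos
instance (S : Int) (B0_pos : Int) (B1_pos : Int) (B2_pos : Int) (B3_pos : Int) (out : Int) : Decidable (Spec_rowperm S B0_pos B1_pos B2_pos B3_pos out) := by unfold Spec_rowperm; infer_instance

-- ===== CLAIM (what is proved, stated in full; the proofs are below) =====
def Claim_equal_rowperm : Prop := ∀ (S : Int) (B0_pos : Int) (B1_pos : Int) (B2_pos : Int) (B3_pos : Int), Dom_rowperm S B0_pos B1_pos B2_pos B3_pos → Pre_rowperm S B0_pos B1_pos B2_pos B3_pos → Spec_rowperm S B0_pos B1_pos B2_pos B3_pos (rowperm S B0_pos B1_pos B2_pos B3_pos)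

-- ===== LEMMAS AND PROOFS =====

-- disjoint bits: or is addition
lemma pvOrAdd : ∀ a b : Nat, a &&& b = 0 → a ||| b = a + b := by
  intro a
  induction a using Nat.binaryRec with
  | zero => intro b _; rw [Nat.zero_or, Nat.zero_add]
  | bit bit n ih =>
    intro b h
    cases b using Nat.bitCasesOn with
    | _ b2 m =>
      rw [Nat.land_bit] at h
      rw [Nat.lor_bit]
      rcases Nat.bit_eq_zero_iff.mp h with ⟨hm, hb⟩
      rw [ih m hm, Nat.bit_val, Nat.bit_val, Nat.bit_val]
      cases bit <;> cases b2 <;> simp_all <;> omega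

lemma pvAndOrXor (t u : Nat) : (t &&& u) ||| (t &&& (t ^^^ u)) = t := by
  apply Nat.eq_of_testBit_eq; intro i
  simp only [Nat.testBit_or, Nat.testBit_and, Nat.testBit_xor]
  cases t.testBit i <;> cases u.testBit i <;> rfl

lemma pvAndDisj (t u : Nat) : (t &&& u) &&& (t &&& (t ^^^ u)) = 0 := by
  apply Nat.eq_of_testBit_eq; intro i
  simp only [Nat.testBit_and, Nat.testBit_xor, Nat.zero_testBit]
  cases t.testBit i <;> cases u.testBit i <;> rfl

-- 't & ~u' restricted to a nonnegative mask t, in the subtraction form PySem's band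
-- produces on a negative left operand
lemma pvSubAnd (t u : Nat) : t - (t &&& u) = t &&& (t ^^^ u) := by
  have h := pvOrAdd _ _ (pvAndDisj t u)
  rw [pvAndOrXor] at h
  omega

lemma pvTestBitOne (n : Nat) : Nat.testBit 1 n = decide (n = 0) := by
  rw [show (1:Nat) = 2^1 - 1 from rfl, Nat.testBit_two_pow_sub_one]
  rcases n with _ | n <;> simp

lemma pvTestBit65535 (n : Nat) : Nat.testBit 65535 n = decide (n < 16) := by
  rw [show (65535:Nat) = 2^16 - 1 from rfl, Nat.testBit_two_pow_sub_one]

lemma pvShrAnd (a b : Nat) (k : Nat) : (a &&& b) >>> k = (a >>> k) &&& (b >>> k) := by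
  apply Nat.eq_of_testBit_eq; intro i
  simp [Nat.testBit_and, Nat.testBit_shiftRight]

lemma pvAnd2 (a : Nat) : a &&& 2 = ((a >>> 1) &&& 1) <<< 1 := by
  apply Nat.eq_of_testBit_eq; intro i
  simp only [Nat.testBit_and, Nat.testBit_shiftLeft, Nat.testBit_shiftRight, pvTestBitOne]
  rcases i with _ | _ | i <;> simp [Nat.testBit_succ]

lemma pvAnd4 (a : Nat) : a &&& 4 = ((a >>> 2) &&& 1) <<< 2 := by
  apply Nat.eq_of_testBit_eq; intro i
  simp only [Nat.testBit_and, Nat.testBit_shiftLeft, Nat.testBit_shiftRight, pvTestBitOne]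
  rcases i with _ | _ | _ | i <;> simp [Nat.testBit_succ]

lemma pvAnd8 (a : Nat) : a &&& 8 = ((a >>> 3) &&& 1) <<< 3 := by
  apply Nat.eq_of_testBit_eq; intro i
  simp only [Nat.testBit_and, Nat.testBit_shiftLeft, Nat.testBit_shiftRight, pvTestBitOne]
  rcases i with _ | _ | _ | _ | i <;> simp [Nat.testBit_succ]

lemma pvOrAndDistrib (a b c : Nat) : (a ||| b) &&& c = (a &&& c) ||| (b &&& c) := by
  apply Nat.eq_of_testBit_eq; intro i
  simp only [Nat.testBit_or, Nat.testBit_and]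
  cases a.testBit i <;> cases b.testBit i <;> cases c.testBit i <;> rfl

lemma pvShr2 (v : Nat) (a b c : Nat) (h : c = a + b) : (v >>> a) >>> b = v >>> c := by
  rw [h, Nat.shiftRight_add]

-- the SWAR column identity: the masked shift-fold nibble, shifted to q, is the four
-- single-bit moves of that column
lemma pvColPos (u q : Nat) :
    ((((u &&& 4369) ||| ((u &&& 4369) >>> 3)) ||| ((u &&& 4369) >>> 6) ||| ((u &&& 4369) >>> 9)) &&& 15) <<< q
      = (((u &&& 1) <<< q ||| ((u >>> 4) &&& 1) <<< (1 + q)) ||| ((u >>> 8) &&& 1) <<< (2 + q)) |||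
          ((u >>> 12) &&& 1) <<< (3 + q) := by
  rw [pvOrAndDistrib, pvOrAndDistrib, pvOrAndDistrib]
  rw [pvShrAnd, pvShrAnd, pvShrAnd]
  rw [show (4369:Nat) >>> 3 = 546 from rfl, show (4369:Nat) >>> 6 = 68 from rfl,
      show (4369:Nat) >>> 9 = 8 from rfl]
  rw [Nat.and_assoc, Nat.and_assoc, Nat.and_assoc, Nat.and_assoc]
  rw [show (4369:Nat) &&& 15 = 1 from rfl, show (546:Nat) &&& 15 = 2 from rfl,
      show (68:Nat) &&& 15 = 4 from rfl, show (8:Nat) &&& 15 = 8 from rfl]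
  rw [pvAnd2, pvAnd4, pvAnd8]
  rw [pvShr2 u 3 1 4 rfl, pvShr2 u 6 2 8 rfl, pvShr2 u 9 3 12 rfl]
  rw [Nat.shiftLeft_or_distrib, Nat.shiftLeft_or_distrib, Nat.shiftLeft_or_distrib]
  rw [← Nat.shiftLeft_add, ← Nat.shiftLeft_add, ← Nat.shiftLeft_add]

-- bridge from the complement-within-a-mask form to the 16-bit complement value
lemma pvMaskCompl (m u : Nat) (hm : m &&& 65535 = m) :
    m &&& (m ^^^ u) = (65535 &&& (65535 ^^^ u)) &&& m := by
  apply Nat.eq_of_testBit_eq; intro i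
  have hmi : (m.testBit i && Nat.testBit 65535 i) = m.testBit i := by
    have := congrArg (fun x => Nat.testBit x i) hm
    simpa [Nat.testBit_and] using this
  simp only [Nat.testBit_and, Nat.testBit_xor]
  cases hm' : m.testBit i <;> rw [hm'] at hmi
  · simp
  · have h16 : Nat.testBit 65535 i = true := by simpa using hmi
    rw [h16]
    cases u.testBit i <;> rfl

lemma pvBitCompl (u k : Nat) (hk : k < 16) :
    1 &&& (1 ^^^ (u >>> k)) = ((65535 &&& (65535 ^^^ u)) >>> k) &&& 1 := by
  apply Nat.eq_of_testBit_eq; intro i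
  simp only [Nat.testBit_and, Nat.testBit_xor, Nat.testBit_shiftRight, pvTestBitOne,
    pvTestBit65535]
  rcases i with _ | i
  · simp [hk]
  · simp

lemma pvColNeg (u q : Nat) :
    ((((4369 &&& (4369 ^^^ u)) ||| ((4369 &&& (4369 ^^^ u)) >>> 3)) ||| ((4369 &&& (4369 ^^^ u)) >>> 6) ||| ((4369 &&& (4369 ^^^ u)) >>> 9)) &&& 15) <<< q
      = (((1 &&& (1 ^^^ u)) <<< q ||| (1 &&& (1 ^^^ (u >>> 4))) <<< (1 + q)) ||| (1 &&& (1 ^^^ (u >>> 8))) <<< (2 + q)) |||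
          (1 &&& (1 ^^^ (u >>> 12))) <<< (3 + q) := by
  rw [pvMaskCompl 4369 u rfl, pvColPos (65535 &&& (65535 ^^^ u)) q]
  rw [← pvBitCompl u 4 (by omega), ← pvBitCompl u 8 (by omega), ← pvBitCompl u 12 (by omega)]
  have h0 : (65535 &&& (65535 ^^^ u)) &&& 1 = 1 &&& (1 ^^^ u) := by
    have := pvBitCompl u 0 (by omega)
    simpa using this.symm
  rw [h0]

lemma pvLorLeftComm (a b c : Nat) : a ||| (b ||| c) = b ||| (a ||| c) := by
  rw [← Nat.lor_assoc, Nat.lor_comm a b, Nat.lor_assoc]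

-- Int-to-Nat bridges for the PySem primitives as they occur in the two ports
lemma pvBorZeroL (a : Int) : PySem.Int.bor 0 a = a := by
  rw [PySem.Int.bor_comm]; exact PySem.Int.bor_zero a

lemma pvBandOnePos (a : Nat) : PySem.Int.band (a:Int) 1 = ((a &&& 1 : Nat) : Int) := by
  exact_mod_cast PySem.Int.band_natCast a 1

lemma pvBandMaskPos (a : Nat) : PySem.Int.band (a:Int) 4369 = ((a &&& 4369 : Nat) : Int) := by
  exact_mod_cast PySem.Int.band_natCast a 4369

lemma pvBandNegSucc (w : Nat) (m : Nat) : PySem.Int.band (Int.negSucc w) (m:Int) = ((m - (m &&& w) : Nat) : Int) := by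
  unfold PySem.Int.band
  rw [if_neg (by omega), if_pos (by positivity)]
  rw [show (-Int.negSucc w - 1).toNat = w from by rw [Int.negSucc_eq]; omega,
      show ((m:Int)).toNat = m from Int.toNat_natCast m]

lemma pvBandOneNeg (w : Nat) (k : Nat) : PySem.Int.band ((Int.negSucc w) >>> k) 1 = ((1 - (1 &&& (w >>> k)) : Nat) : Int) := by
  rw [show (Int.negSucc w) >>> k = Int.negSucc (w >>> k) from rfl]
  exact_mod_cast pvBandNegSucc (w >>> k) 1

lemma pvBandMaskNeg (w : Nat) (k : Nat) : PySem.Int.band ((Int.negSucc w) >>> k) 4369 = ((4369 - (4369 &&& (w >>> k)) : Nat) : Int) := by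
  rw [show (Int.negSucc w) >>> k = Int.negSucc (w >>> k) from rfl]
  exact_mod_cast pvBandNegSucc (w >>> k) 4369

lemma pvBorCast (a b : Nat) : PySem.Int.bor (a:Int) (b:Int) = ((a ||| b : Nat) : Int) := PySem.Int.bor_natCast a b

lemma pvShlCast (a q : Nat) : ((a:Int)) <<< q = ((a <<< q : Nat) : Int) := rfl

lemma pvShrCast (a q : Nat) : ((a:Int)) >>> q = ((a >>> q : Nat) : Int) := rfl

lemma pvBand15Cast (a : Nat) : PySem.Int.band (a:Int) 15 = ((a &&& 15 : Nat) : Int) := by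
  exact_mod_cast PySem.Int.band_natCast a 15

-- ===== VERDICT (by name: the statement is the Claim_ definition above) =====
set_option maxHeartbeats 8000000 in
theorem rowperm_spec : Claim_equal_rowperm := by
  intro S B0 B1 B2 B3 _ hp
  obtain ⟨h0, h1, h2, h3⟩ := hp
  obtain ⟨n0, rfl⟩ : ∃ n : Nat, B0 = (n : Int) := ⟨B0.toNat, by omega⟩
  obtain ⟨n1, rfl⟩ : ∃ n : Nat, B1 = (n : Int) := ⟨B1.toNat, by omega⟩
  obtain ⟨n2, rfl⟩ : ∃ n : Nat, B2 = (n : Int) := ⟨B2.toNat, by omega⟩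
  obtain ⟨n3, rfl⟩ : ∃ n : Nat, B3 = (n : Int) := ⟨B3.toNat, by omega⟩
  unfold Spec_rowperm rowperm rowperm_alt
  rw [show PySem.List.pyRange 0 4 1 = [0,1,2,3] from by decide]
  rw [show PySem.List.enumerate [(n0:Int), (n1:Int), (n2:Int), (n3:Int)] = [(0,(n0:Int)),(1,(n1:Int)),(2,(n2:Int)),(3,(n3:Int))] from rfl]
  simp only [List.foldl]
  rw [show ((0:Int)).toNat = 0 from rfl, show ((1:Int)).toNat = 1 from rfl, show ((2:Int)).toNat = 2 from rfl, show ((3:Int)).toNat = 3 from rfl]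
  rw [show ((4 * 0 + 0 : Int)).toNat = 0 from rfl, show ((4 * 0 + 1 : Int)).toNat = 1 from rfl, show ((4 * 0 + 2 : Int)).toNat = 2 from rfl, show ((4 * 0 + 3 : Int)).toNat = 3 from rfl, show ((4 * 1 + 0 : Int)).toNat = 4 from rfl, show ((4 * 1 + 1 : Int)).toNat = 5 from rfl, show ((4 * 1 + 2 : Int)).toNat = 6 from rfl, show ((4 * 1 + 3 : Int)).toNat = 7 from rfl, show ((4 * 2 + 0 : Int)).toNat = 8 from rfl, show ((4 * 2 + 1 : Int)).toNat = 9 from rfl, show ((4 * 2 + 2 : Int)).toNat = 10 from rfl, show ((4 * 2 + 3 : Int)).toNat = 11 from rfl, show ((4 * 3 + 0 : Int)).toNat = 12 from rfl, show ((4 * 3 + 1 : Int)).toNat = 13 from rfl, show ((4 * 3 + 2 : Int)).toNat = 14 from rfl, show ((4 * 3 + 3 : Int)).toNat = 15 from rfl]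
  rw [show ((0:Int) + 4 * (n0:Int)).toNat = 4 * n0 from by omega, show ((0:Int) + 4 * (n1:Int)).toNat = 4 * n1 from by omega, show ((0:Int) + 4 * (n2:Int)).toNat = 4 * n2 from by omega, show ((0:Int) + 4 * (n3:Int)).toNat = 4 * n3 from by omega]
  rw [show ((1:Int) + 4 * (n0:Int)).toNat = 1 + 4 * n0 from by omega, show ((1:Int) + 4 * (n1:Int)).toNat = 1 + 4 * n1 from by omega, show ((1:Int) + 4 * (n2:Int)).toNat = 1 + 4 * n2 from by omega, show ((1:Int) + 4 * (n3:Int)).toNat = 1 + 4 * n3 from by omega]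
  rw [show ((2:Int) + 4 * (n0:Int)).toNat = 2 + 4 * n0 from by omega, show ((2:Int) + 4 * (n1:Int)).toNat = 2 + 4 * n1 from by omega, show ((2:Int) + 4 * (n2:Int)).toNat = 2 + 4 * n2 from by omega, show ((2:Int) + 4 * (n3:Int)).toNat = 2 + 4 * n3 from by omega]
  rw [show ((3:Int) + 4 * (n0:Int)).toNat = 3 + 4 * n0 from by omega, show ((3:Int) + 4 * (n1:Int)).toNat = 3 + 4 * n1 from by omega, show ((3:Int) + 4 * (n2:Int)).toNat = 3 + 4 * n2 from by omega, show ((3:Int) + 4 * (n3:Int)).toNat = 3 + 4 * n3 from by omega]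
  rw [show ((4 * (n0:Int))).toNat = 4 * n0 from by omega, show ((4 * (n1:Int))).toNat = 4 * n1 from by omega, show ((4 * (n2:Int))).toNat = 4 * n2 from by omega, show ((4 * (n3:Int))).toNat = 4 * n3 from by omega]
  rcases Int.lt_or_le S 0 with hs | hs
  · obtain ⟨w, rfl⟩ := Int.eq_negSucc_of_lt_zero hs
    simp only [pvBandOneNeg, pvBandMaskNeg, pvBorZeroL, pvShrCast, pvBand15Cast, pvShlCast, pvBorCast]
    rw [Nat.cast_inj]
    simp only [pvSubAnd]
    rw [pvColNeg (w >>> 0) (4 * n0), pvColNeg (w >>> 1) (4 * n1), pvColNeg (w >>> 2) (4 * n2), pvColNeg (w >>> 3) (4 * n3)]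
    rw [pvShr2 w 0 4 4 rfl, pvShr2 w 0 8 8 rfl, pvShr2 w 0 12 12 rfl,
        pvShr2 w 1 4 5 rfl, pvShr2 w 1 8 9 rfl, pvShr2 w 1 12 13 rfl,
        pvShr2 w 2 4 6 rfl, pvShr2 w 2 8 10 rfl, pvShr2 w 2 12 14 rfl,
        pvShr2 w 3 4 7 rfl, pvShr2 w 3 8 11 rfl, pvShr2 w 3 12 15 rfl]
    simp only [Nat.lor_assoc, pvLorLeftComm]
  · obtain ⟨s, rfl⟩ : ∃ n : Nat, S = (n : Int) := ⟨S.toNat, by omega⟩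
    simp only [pvBandOnePos, pvBandMaskPos, pvBorZeroL, pvShrCast, pvBand15Cast, pvShlCast, pvBorCast]
    rw [Nat.cast_inj]
    rw [pvColPos (s >>> 0) (4 * n0), pvColPos (s >>> 1) (4 * n1), pvColPos (s >>> 2) (4 * n2), pvColPos (s >>> 3) (4 * n3)]
    rw [pvShr2 s 0 4 4 rfl, pvShr2 s 0 8 8 rfl, pvShr2 s 0 12 12 rfl,
        pvShr2 s 1 4 5 rfl, pvShr2 s 1 8 9 rfl, pvShr2 s 1 12 13 rfl,
        pvShr2 s 2 4 6 rfl, pvShr2 s 2 8 10 rfl, pvShr2 s 2 12 14 rfl,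
        pvShr2 s 3 4 7 rfl, pvShr2 s 3 8 11 rfl, pvShr2 s 3 12 15 rfl]
    simp only [Nat.lor_assoc, pvLorLeftComm]
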